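-- pv_equiv track=rewrite | github.com/CharlieHuang95/DataStructures | MatrixOperations.py | column_sum_square
-- ===== SOURCE A (Python) =====
-- def column_sum_square(mat):
--     '''
--     (list) --> (list)
--     Given a matrix, return a row vector with the sum of the elements in their
--     respective columns.
--     '''
--
--     new_matrix = []
--     for i in range(len(mat[0])):
--         sum = 0
--         for j in range(len(mat)):
--             sum += (mat[j][i])**2
--         new_matrix.append(sum)
--     return new_matrix
-- ===== SOURCE B (Python) =====
-- def column_sum_square(mat):
--     # Single row-wise pass: keep a running vector of per-column sums of squares
--     # and fold each row into it, instead of scanning every column separately.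
--     acc = [0] * len(mat[0])
--     for row in mat:
--         acc = [s + x * x for s, x in zip(acc, row)]
--     return acc
-- ===== Notes on version B (the rewrite author's own statement) =====
-- stated objective: alternative
-- what changed: B makes one row-wise pass maintaining a running accumulator vector of per-column sums (folding each row elementwise into it), instead of A's column-by-column nested index scans over range(len(mat[0]))/range(len(mat)).
import Mathlib
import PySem

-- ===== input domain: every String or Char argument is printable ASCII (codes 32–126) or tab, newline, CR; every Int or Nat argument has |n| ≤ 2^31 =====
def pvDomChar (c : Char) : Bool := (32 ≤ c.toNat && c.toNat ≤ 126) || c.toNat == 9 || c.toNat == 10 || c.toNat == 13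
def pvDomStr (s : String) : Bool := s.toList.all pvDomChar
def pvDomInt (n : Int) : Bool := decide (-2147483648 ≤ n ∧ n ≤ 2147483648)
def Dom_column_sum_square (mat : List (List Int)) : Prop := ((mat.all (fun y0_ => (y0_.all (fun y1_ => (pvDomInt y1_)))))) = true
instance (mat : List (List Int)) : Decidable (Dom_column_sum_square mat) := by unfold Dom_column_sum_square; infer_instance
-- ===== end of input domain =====

-- B replaces A's column-by-column nested index scans by one row-wise pass
-- folding each row elementwise into a running accumulator vector.

-- ===== PORT A =====
-- literal transliteration of A: for i in range(len(mat[0])): sum = 0; for j in range(len(mat)): sum += mat[j][i]**2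
-- (indexing defaults are unreachable under Pre_)
def column_sum_square (mat : List (List Int)) : List Int :=
  (List.range (mat.headD []).length).foldl
    (fun new_matrix i =>
      new_matrix ++
        [(List.range mat.length).foldl (fun sum j => sum + ((mat.getD j []).getD i 0) ^ 2) 0])
    []

-- ===== PORT B =====
-- acc = [s + x*x for s, x in zip(acc, row)]  (Python zip truncates to the shorter list)
def pvStep (acc row : List Int) : List Int :=
  (acc.zip row).map (fun p => p.1 + p.2 * p.2)

def column_sum_square_alt (mat : List (List Int)) : List Int :=
  mat.foldl pvStep (List.replicate (mat.headD []).length 0)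

-- ===== PRECONDITION & SPEC =====
-- Pre_ excludes exactly the inputs on which A raises IndexError: the empty matrix (mat[0])
-- and matrices where some row is shorter than the first row (mat[j][i]).
def Pre_column_sum_square (mat : List (List Int)) : Prop :=
  mat ≠ [] ∧ ∀ r ∈ mat, (mat.headD []).length ≤ r.length
instance (mat : List (List Int)) : Decidable (Pre_column_sum_square mat) := by
  unfold Pre_column_sum_square; infer_instance

def pvWitness_column_sum_square : List (List Int) := [[1, 2], [3, 4], [5, 6]]

def Spec_column_sum_square (mat : List (List Int)) (out : List Int) : Prop :=
  out = column_sum_square_alt mat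
instance (mat : List (List Int)) (out : List Int) : Decidable (Spec_column_sum_square mat out) := by
  unfold Spec_column_sum_square; infer_instance

-- ===== CLAIM (what is proved, stated in full; the proofs are below) =====
def Claim_equal_column_sum_square : Prop :=
  ∀ (mat : List (List Int)), Dom_column_sum_square mat → Pre_column_sum_square mat →
    Spec_column_sum_square mat (column_sum_square mat)

-- ===== LEMMAS AND PROOFS =====

-- A's append-accumulate loop is a map over the index range
lemma foldl_append_singleton (g : Nat → Int) :
    ∀ (l : List Nat) (acc : List Int),
      l.foldl (fun a i => a ++ [g i]) acc = acc ++ l.map g := by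
  intro l
  induction l with
  | nil => simp
  | cons a t ih => intro acc; simp [List.foldl_cons, ih]

-- indexing a list by range(len l) and folding equals folding the list itself
lemma range_foldl_getD {α β : Type} (f : β → α → β) (d : α) :
    ∀ (l : List α) (init : β),
      (List.range l.length).foldl (fun s j => f s (l.getD j d)) init = l.foldl f init := by
  intro l
  induction l with
  | nil => simp
  | cons a t ih =>
    intro init
    rw [List.length_cons, List.range_succ_eq_map, List.foldl_cons, List.foldl_map]
    simp only [List.getD_cons_zero, List.getD_cons_succ]
    exact ih (f init a)

lemma pvStep_length (acc r : List Int) (h : acc.length ≤ r.length) :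
    (pvStep acc r).length = acc.length := by
  simp [pvStep]; omega

lemma pvStep_getD (acc r : List Int) (i : Nat) (h : acc.length ≤ r.length)
    (hi : i < acc.length) :
    (pvStep acc r).getD i 0 = acc.getD i 0 + (r.getD i 0) * (r.getD i 0) := by
  have hz : i < (acc.zip r).length := by simp; omega
  have hr : i < r.length := by omega
  rw [pvStep, List.getD_eq_getElem _ _ (by simpa using hz),
    List.getD_eq_getElem _ _ hi, List.getD_eq_getElem _ _ hr]
  simp

lemma self_map_range (l : List Int) :
    (List.range l.length).map (fun i => l.getD i 0) = l := by
  apply List.ext_getElem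
  · simp
  · intro i h1 h2
    simp [h2]

lemma foldl_add_shift (g : List Int → Int) :
    ∀ (l : List (List Int)) (c : Int),
      l.foldl (fun s r => s + g r) c = c + l.foldl (fun s r => s + g r) 0 := by
  intro l
  induction l with
  | nil => simp
  | cons a t ih =>
    intro c
    rw [List.foldl_cons, List.foldl_cons, ih, ih (0 + g a)]
    ring

-- the row-wise fold maintains, at every index, the running column sum of squares
lemma fold_eq :
    ∀ (rows : List (List Int)) (acc : List Int),
      (∀ r ∈ rows, acc.length ≤ r.length) →
      rows.foldl pvStep acc =
        (List.range acc.length).map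
          (fun i => acc.getD i 0 +
            rows.foldl (fun s r => s + (r.getD i 0) * (r.getD i 0)) 0) := by
  intro rows
  induction rows with
  | nil =>
    intro acc _
    simpa using (self_map_range acc).symm
  | cons r rs ih =>
    intro acc hall
    have hr : acc.length ≤ r.length := hall r (by simp)
    rw [List.foldl_cons,
      ih (pvStep acc r) (by intro r' hr'; rw [pvStep_length acc r hr]; exact hall r' (by simp [hr']))]
    rw [pvStep_length acc r hr]
    apply List.map_congr_left
    intro i hi
    have hi' : i < acc.length := by simpa using hi
    rw [pvStep_getD acc r i hr hi', List.foldl_cons,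
      foldl_add_shift (fun r => (r.getD i 0) * (r.getD i 0)) rs (0 + r.getD i 0 * r.getD i 0)]
    ring

-- ===== VERDICT (by name: the statement is the Claim_ definition above) =====
theorem column_sum_square_spec : Claim_equal_column_sum_square := by
  intro mat _ hpre
  obtain ⟨hne, hall⟩ := hpre
  unfold Spec_column_sum_square column_sum_square column_sum_square_alt
  rw [fold_eq mat (List.replicate (mat.headD []).length 0)
    (by intro r hr; simpa using hall r hr)]
  rw [foldl_append_singleton, List.nil_append, List.length_replicate]
  apply List.map_congr_left
  intro i hi
  rw [range_foldl_getD (fun s r => s + (r.getD i 0) ^ 2) ([] : List Int) mat]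
  rw [List.getD_replicate _ (List.mem_range.mp hi), zero_add]
  congr 1
  funext s x
  ring
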